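-- pv_equiv track=rewrite | github.com/hlycharles/dota2-item-recommendation | feature_generator_rnn.py | get_runes_log
-- ===== SOURCE A (Python) =====
-- runes_types = 7
--
-- runes_len = 2
--
-- def get_runes_log(runes_log, time_slice):
--     result = [0] * (runes_types * runes_len)
--
--     for runes in runes_log:
--         time = runes['time']
--         key = runes['key']
--         if (time > time_slice * 60):
--             continue
--         if (key >= runes_types or key < 0):
--             continue
--         base_index = key * runes_len
--         result[base_index] += 1
--         if (result[base_index] ==1 or time > result[base_index + 1]):
--             result[base_index + 1] = time
--
--     return result
-- ===== SOURCE B (Python) =====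
-- runes_types = 7
--
-- runes_len = 2
--
-- def get_runes_log(runes_log, time_slice):
--     # partition-then-reduce: filter valid entries once, then per key emit [count, max]
--     cutoff = time_slice * 60
--     valid = [(r['time'], r['key']) for r in runes_log
--              if r['time'] <= cutoff and 0 <= r['key'] < runes_types]
--     result = []
--     for k in range(runes_types):
--         times = [t for t, kk in valid if kk == k]
--         if times:
--             result += [len(times), max(times)]
--         else:
--             result += [0, 0]
--     return result
-- ===== Notes on version B (the rewrite author's own statement) =====
-- stated objective: simpler
-- what changed: Replaces the in-place 14-slot array with incremental count/running-max updates by a filter pass that collects valid (time,key) pairs followed by a per-key pass emitting [count, max] (or [0,0]) segments that are concatenated in key order.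
import Mathlib
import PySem

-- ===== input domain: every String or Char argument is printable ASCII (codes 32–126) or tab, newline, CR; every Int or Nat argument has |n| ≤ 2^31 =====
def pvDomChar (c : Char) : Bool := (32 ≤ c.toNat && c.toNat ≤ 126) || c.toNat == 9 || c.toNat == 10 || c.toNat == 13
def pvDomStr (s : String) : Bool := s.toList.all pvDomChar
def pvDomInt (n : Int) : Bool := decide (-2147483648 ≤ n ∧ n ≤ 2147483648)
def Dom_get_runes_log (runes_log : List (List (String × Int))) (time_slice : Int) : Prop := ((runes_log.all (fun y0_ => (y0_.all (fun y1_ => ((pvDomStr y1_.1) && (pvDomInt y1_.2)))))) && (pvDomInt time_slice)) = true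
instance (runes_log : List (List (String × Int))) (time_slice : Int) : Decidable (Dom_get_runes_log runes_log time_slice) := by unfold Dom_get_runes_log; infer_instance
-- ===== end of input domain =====

-- B replaces A's in-place 14-slot array with incremental count/running-max updates by a filter pass
-- that collects the valid (time, key) pairs followed by a per-key pass emitting [count, max] (or
-- [0, 0]) segments concatenated in key order (objective: simpler decomposition; same cost class).

-- ===== PORT A =====
-- loop body of A's for-loop (dict lookup = first match on the association list)
def runesStep (time_slice : Int) (result : List (Int)) (runes : List (String × Int)) : List Int :=
  match runes.lookup "time", runes.lookup "key" with
  | some time, some key =>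
    if time > time_slice * 60 then result
    else if key ≥ 7 ∨ key < 0 then result
    else
      let base_index := key * 2
      let result := PySem.List.pySetD result base_index (PySem.List.pyGetD result base_index 0 + 1)
      if PySem.List.pyGetD result base_index 0 = 1 ∨ time > PySem.List.pyGetD result (base_index + 1) 0
      then PySem.List.pySetD result (base_index + 1) time else result
  | _, _ => result  -- unreachable under Pre_ (Python raises KeyError there)

def get_runes_log (runes_log : List (List (String × Int))) (time_slice : Int) : List Int :=
  runes_log.foldl (runesStep time_slice) (List.replicate (7 * 2) 0)

-- ===== PORT B =====
-- the list-comprehension filter of Source B: keep (time, key) for the valid entries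
def validEntry (time_slice : Int) (r : List (String × Int)) : Option (Int × Int) :=
  match r.lookup "time", r.lookup "key" with
  | some t, some k => if t ≤ time_slice * 60 ∧ 0 ≤ k ∧ k < 7 then some (t, k) else none
  | _, _ => none  -- unreachable under Pre_ (Python raises KeyError there)

def get_runes_log_alt (runes_log : List (List (String × Int))) (time_slice : Int) : List Int :=
  let valid := runes_log.filterMap (validEntry time_slice)
  (PySem.List.pyRange 0 7 1).foldl (fun result k =>
    let times := (valid.filter (fun p => p.2 == k)).map Prod.fst
    match PySem.List.max? times (fun t => t) with
    | some m => result ++ [(times.length : Int), m]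
    | none => result ++ [0, 0]) []

-- ===== PRECONDITION & SPEC =====
-- Pre_ excludes only entries missing the "time" or "key" field, on which the Python A raises KeyError.
def Pre_get_runes_log (runes_log : List (List (String × Int))) (time_slice : Int) : Prop :=
  ∀ r ∈ runes_log, (r.lookup "time").isSome ∧ (r.lookup "key").isSome
instance (runes_log : List (List (String × Int))) (time_slice : Int) : Decidable (Pre_get_runes_log runes_log time_slice) := by unfold Pre_get_runes_log; infer_instance

def pvWitness_get_runes_log : (List (List (String × Int))) × Int :=
  ([[("time", 30), ("key", 1)], [("time", 500), ("key", 2)]], 2)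

def Spec_get_runes_log (runes_log : List (List (String × Int))) (time_slice : Int) (out : List Int) : Prop := out = get_runes_log_alt runes_log time_slice
instance (runes_log : List (List (String × Int))) (time_slice : Int) (out : List Int) : Decidable (Spec_get_runes_log runes_log time_slice out) := by unfold Spec_get_runes_log; infer_instance

-- ===== CLAIM (what is proved, stated in full; the proofs are below) =====
def Claim_equal_get_runes_log : Prop := ∀ (runes_log : List (List (String × Int))) (time_slice : Int), Dom_get_runes_log runes_log time_slice → Pre_get_runes_log runes_log time_slice → Spec_get_runes_log runes_log time_slice (get_runes_log runes_log time_slice)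

-- ===== LEMMAS AND PROOFS =====

-- per-key summaries of the valid list v of (time, key) pairs; pvOut v is B's result
def pvTimes (k : Int) (v : List (Int × Int)) : List Int :=
  (v.filter (fun p => p.2 == k)).map Prod.fst
def pvCnt (k : Int) (v : List (Int × Int)) : Int := (pvTimes k v).length
def pvMx (k : Int) (v : List (Int × Int)) : Int :=
  (PySem.List.max? (pvTimes k v) (fun t => t)).getD 0
def pvOut (v : List (Int × Int)) : List Int :=
  [pvCnt 0 v, pvMx 0 v, pvCnt 1 v, pvMx 1 v, pvCnt 2 v, pvMx 2 v, pvCnt 3 v, pvMx 3 v,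
   pvCnt 4 v, pvMx 4 v, pvCnt 5 v, pvMx 5 v, pvCnt 6 v, pvMx 6 v]

lemma seg_eq (ts res : List Int) :
    (match PySem.List.max? ts (fun t => t) with
      | some m => res ++ [(ts.length : Int), m]
      | none => res ++ [0, 0])
    = res ++ [(ts.length : Int), (PySem.List.max? ts (fun t => t)).getD 0] := by
  cases h : PySem.List.max? ts (fun t => t) with
  | none =>
      have he := (PySem.List.max?_eq_none_iff _ _).mp h
      subst he
      simp [PySem.List.max?]
  | some m => simp [h]

lemma alt_eq_pvOut (runes_log : List (List (String × Int))) (time_slice : Int) :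
    get_runes_log_alt runes_log time_slice = pvOut (runes_log.filterMap (validEntry time_slice)) := by
  have hr : PySem.List.pyRange 0 7 1 = [0, 1, 2, 3, 4, 5, 6] := by decide
  unfold get_runes_log_alt
  rw [hr]
  simp only [List.foldl_cons, List.foldl_nil, seg_eq]
  simp [pvOut, pvCnt, pvMx, pvTimes]

lemma times_append_eq (k t : Int) (v : List (Int × Int)) :
    pvTimes k (v ++ [(t, k)]) = pvTimes k v ++ [t] := by
  simp [pvTimes]

lemma times_append_ne (j k t : Int) (h : j ≠ k) (v : List (Int × Int)) :
    pvTimes j (v ++ [(t, k)]) = pvTimes j v := by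
  simp [pvTimes, h.symm]

lemma cnt_append_eq (k t : Int) (v : List (Int × Int)) :
    pvCnt k (v ++ [(t, k)]) = pvCnt k v + 1 := by
  simp [pvCnt, times_append_eq]

lemma cnt_append_ne (j k t : Int) (h : j ≠ k) (v : List (Int × Int)) :
    pvCnt j (v ++ [(t, k)]) = pvCnt j v := by
  simp [pvCnt, times_append_ne j k t h]

lemma mx_append_ne (j k t : Int) (h : j ≠ k) (v : List (Int × Int)) :
    pvMx j (v ++ [(t, k)]) = pvMx j v := by
  simp [pvMx, times_append_ne j k t h]

lemma max_getD_append (ts : List Int) (t : Int) :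
    (PySem.List.max? (ts ++ [t]) (fun x => x)).getD 0
    = if ts = [] ∨ t > (PySem.List.max? ts (fun x => x)).getD 0 then t
      else (PySem.List.max? ts (fun x => x)).getD 0 := by
  cases ts with
  | nil => simp [PySem.List.max?_id_cons]
  | cons x l =>
      simp only [List.cons_append, PySem.List.max?_id_cons, List.foldl_append, List.foldl_cons,
        List.foldl_nil, Option.getD_some, reduceCtorEq, false_or]
      rcases le_or_gt t (l.foldl max x) with h | h
      · simp [not_lt.mpr h, max_eq_left h]
      · simp [h, max_eq_right h.le]

lemma mx_append_eq (k t : Int) (v : List (Int × Int)) :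
    pvMx k (v ++ [(t, k)]) = if pvCnt k v + 1 = 1 ∨ t > pvMx k v then t else pvMx k v := by
  rw [pvMx, times_append_eq, max_getD_append]
  by_cases h0 : pvTimes k v = []
  · simp [h0, pvCnt, pvMx]
  · have hne : ¬ (pvCnt k v + 1 = 1) := by
      intro h
      apply h0
      apply List.length_eq_zero_iff.mp
      unfold pvCnt at h
      omega
    simp [h0, hne, pvMx]

-- A's loop body maps B's summary of v to B's summary of v plus the entry (if valid)
lemma step_pvOut (time_slice : Int) (v : List (Int × Int)) (r : List (String × Int))
    (hr : (r.lookup "time").isSome ∧ (r.lookup "key").isSome) :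
    runesStep time_slice (pvOut v) r = pvOut (v ++ (validEntry time_slice r).toList) := by
  obtain ⟨h1, h2⟩ := hr
  obtain ⟨t, ht⟩ := Option.isSome_iff_exists.mp h1
  obtain ⟨k, hk⟩ := Option.isSome_iff_exists.mp h2
  unfold runesStep validEntry
  rw [ht, hk]
  by_cases hcut : t > time_slice * 60
  · simp only [if_pos hcut]
    have : ¬ (t ≤ time_slice * 60 ∧ 0 ≤ k ∧ k < 7) := by omega
    simp [this]
  · simp only [if_neg hcut]
    by_cases hrange : k ≥ 7 ∨ k < 0
    · simp only [if_pos hrange]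
      have : ¬ (t ≤ time_slice * 60 ∧ 0 ≤ k ∧ k < 7) := by omega
      simp [this]
    · simp only [if_neg hrange]
      have hcond : t ≤ time_slice * 60 ∧ 0 ≤ k ∧ k < 7 := by omega
      simp only [if_pos hcond, Option.toList_some]
      have hk0 : 0 ≤ k := hcond.2.1
      have hk7 : k < 7 := hcond.2.2
      interval_cases k <;>
        simp [pvOut, PySem.List.pySetD, PySem.List.pySet?, PySem.List.pyGetD, PySem.List.pyGet?,
          PySem.List.pyIdx?, cnt_append_eq, mx_append_eq, cnt_append_ne, mx_append_ne] <;>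
        split_ifs <;> rfl

-- loop invariant: A's fold over the remaining entries extends B's summary of the valid pairs seen
lemma foldl_inv (time_slice : Int) (rest : List (List (String × Int))) :
    ∀ v, (∀ r ∈ rest, (r.lookup "time").isSome ∧ (r.lookup "key").isSome) →
      rest.foldl (runesStep time_slice) (pvOut v)
        = pvOut (v ++ rest.filterMap (validEntry time_slice)) := by
  induction rest with
  | nil => intro v _; simp
  | cons r rest ih =>
      intro v hpre
      have h1 := step_pvOut time_slice v r (hpre r (by simp))
      simp only [List.foldl_cons, h1]
      rw [ih _ (fun r' hr' => hpre r' (by simp [hr']))]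
      simp [List.filterMap_cons]
      cases validEntry time_slice r <;> simp

-- ===== VERDICT (by name: the statement is the Claim_ definition above) =====
theorem get_runes_log_spec : Claim_equal_get_runes_log := by
  intro runes_log time_slice _ hpre
  unfold Spec_get_runes_log get_runes_log
  rw [alt_eq_pvOut]
  have h0 : List.replicate (7 * 2) (0 : Int) = pvOut [] := by decide
  rw [h0, foldl_inv time_slice runes_log [] hpre]
  simp
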